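-- pv_equiv track=rewrite | github.com/Geekoiemax/TIPE-hx3-convexes | src/hx3_convexes/simplexes/core.py | to_cover
-- ===== SOURCE A (Python) =====
-- def _union(S: list) -> list:
--     """Retourne l'union (sans doublons, ordre de première apparition) des listes de S."""
--     u = []
--     for s in S:
--         for x in s:
--             if x not in u:
--                 u.append(x)
--     return u
--
-- def to_cover(S: list) -> tuple:
--     """
--     Traduit la liste de simplexes en une structure pour le problème de couverture.
--
--     Paramètres
--     ----------
--     S : liste de listes d'entiers (simplexes, chacun étant une liste d'indices dans c)
--
--     Sorties
--     -------
--     Tc : list de listes — Tc[k] est la liste des indices i tels que P[k] ∈ S[i]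
--          (même structure que l'original)
--     P  : list — l'union de tous les indices présents dans S (l'univers)
--     """
--     P = _union(S)  # union dans l'ordre de première apparition
--
--     n = len(S)
--     Tc = [[] for _ in range(len(P))]
--     for k, x in enumerate(P):
--         for i in range(n):
--             if x in S[i]:
--                 Tc[k].append(i)
--
--     return Tc, P
-- ===== SOURCE B (Python) =====
-- def to_cover(S: list) -> tuple:
--     # Single pass: bucket each element's simplex indices in an insertion-ordered
--     # dict; per-simplex `seen` set dedups duplicates within one simplex.
--     idx = {}
--     for i, s in enumerate(S):
--         seen = set()
--         for x in s:
--             if x not in seen: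
--                 seen.add(x)
--                 idx.setdefault(x, []).append(i)
--     return list(idx.values()), list(idx.keys())
-- ===== Notes on version B (the rewrite author's own statement) =====
-- stated objective: faster
-- what changed: Instead of building the union P and then, for each element of P, rescanning all n simplexes with a linear membership test, B makes one pass over the simplexes bucketing each element's simplex index into an insertion-ordered dict (with a per-simplex seen-set for dedup); the dict's keys are P and its values are Tc.
import Mathlib
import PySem

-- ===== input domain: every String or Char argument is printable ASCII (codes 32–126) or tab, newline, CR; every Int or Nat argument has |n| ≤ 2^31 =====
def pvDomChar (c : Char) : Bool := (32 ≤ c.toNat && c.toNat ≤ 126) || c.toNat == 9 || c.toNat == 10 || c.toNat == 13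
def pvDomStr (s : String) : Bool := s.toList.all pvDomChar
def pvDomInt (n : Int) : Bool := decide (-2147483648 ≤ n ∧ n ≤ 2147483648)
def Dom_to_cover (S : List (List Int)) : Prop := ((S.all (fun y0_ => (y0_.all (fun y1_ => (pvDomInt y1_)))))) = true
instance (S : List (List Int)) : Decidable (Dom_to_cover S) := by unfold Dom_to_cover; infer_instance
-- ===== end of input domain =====

-- B replaces A's rescan of all simplexes per universe element by a single dict-bucketing pass (measured faster).


-- ===== PORT A =====
-- _union: u = []; for s in S: for x in s: if x not in u: u.append(x)
def pyUnion (S : List (List Int)) : List Int :=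
  S.foldl (fun u s => s.foldl (fun u x => if u.contains x then u else u ++ [x]) u) []

-- Tc[k] is filled by appending i in increasing i; here each row is built by the same
-- inner loop over range(n) and appended once finished (same values, same order).
-- S[i] for i ∈ range(n) is always in range, so pyGetD with default [] is exact.
def to_cover (S : List (List Int)) : List (List Int) × List Int :=
  let P := pyUnion S
  let n : Int := S.length
  let Tc := P.foldl (fun Tc x =>
      Tc ++ [(PySem.List.pyRange 0 n 1).foldl (fun row i =>
        if (PySem.List.pyGetD S i []).contains x then row ++ [i] else row) []]) []
  (Tc, P)

-- ===== PORT B =====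
-- one pass: for i, s in enumerate(S): seen = set(); for x in s:
--   if x not in seen: seen.add(x); idx.setdefault(x, []).append(i)
-- (idx.setdefault(x, []).append(i) is exactly Dict.modify x [] (· ++ [i]))
def to_cover_alt (S : List (List Int)) : List (List Int) × List Int :=
  let idx := (PySem.List.enumerate S 0).foldl (fun idx p =>
      (p.2.foldl (fun (st : PySem.Dict Int (List Int) × PySem.Set Int) x =>
          if PySem.Set.contains st.2 x then st
          else (st.1.modify x [] (· ++ [p.1]), PySem.Set.add st.2 x))
        (idx, PySem.Set.empty)).1)
    PySem.Dict.empty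
  (idx.values, idx.keys)

-- ===== PRECONDITION & SPEC =====
def Spec_to_cover (S : List (List Int)) (out : List (List Int) × List Int) : Prop := out = to_cover_alt S
instance (S : List (List Int)) (out : List (List Int) × List Int) : Decidable (Spec_to_cover S out) := by unfold Spec_to_cover; infer_instance

-- ===== CLAIM (what is proved, stated in full; the proofs are below) =====
def Claim_equal_to_cover : Prop := ∀ (S : List (List Int)), Dom_to_cover S → Spec_to_cover S (to_cover S)

-- ===== LEMMAS AND PROOFS =====

-- `idx[x] gets a value` leaves the key list as a set-add of x.
theorem keys_modify_add (d : PySem.Dict Int (List Int)) (k : Int) (f : List Int → List Int) :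
    (d.modify k [] f).keys = PySem.Set.add d.keys k := by
  rw [PySem.Dict.keys_modify, PySem.Set.add]
  by_cases h : k ∈ d.keys
  · rw [PySem.Dict.keys_insert_of_contains _ _ (by simp [PySem.Dict.contains_eq_decide_mem_keys, h]),
      if_pos (by simp [PySem.Set.contains, h])]
  · rw [PySem.Dict.keys_insert_of_not_contains _ _ (by simp [PySem.Dict.contains_eq_decide_mem_keys, h]),
      if_neg (by simp [PySem.Set.contains, h])]

-- B's inner loop over one simplex, dict component: y gets i appended iff y ∈ s and y not yet seen.
theorem inner_getD (i : Int) :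
    ∀ (s : List Int) (d : PySem.Dict Int (List Int)) (seen : PySem.Set Int) (y : Int),
    ((s.foldl (fun (st : PySem.Dict Int (List Int) × PySem.Set Int) x =>
        if PySem.Set.contains st.2 x then st
        else (st.1.modify x [] (· ++ [i]), PySem.Set.add st.2 x)) (d, seen)).1).getD y []
      = if y ∈ s ∧ y ∉ seen then d.getD y [] ++ [i] else d.getD y []
  | [], d, seen, y => by simp
  | a :: t, d, seen, y => by
    simp only [List.foldl_cons]
    by_cases ha : PySem.Set.contains seen a
    · rw [if_pos ha]
      rw [inner_getD i t d seen y]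
      by_cases hy : y = a
      · subst hy
        have : y ∈ seen := by simpa [PySem.Set.contains] using ha
        simp [this]
      · simp [List.mem_cons, hy]
    · rw [if_neg (by simpa using ha)]
      rw [inner_getD i t _ _ y]
      have hna : a ∉ seen := by simpa [PySem.Set.contains] using ha
      by_cases hy : y = a
      · subst hy
        simp [hna]
      · have h2 : (y ∈ PySem.Set.add seen a) ↔ y ∈ seen := by
          rw [PySem.Set.mem_add]; simp [hy]
        simp [PySem.Dict.getD_modify, hy, h2, List.mem_cons]

-- Set.update is blind to filter changes at elements already in the set.
theorem update_filter_congr :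
    ∀ (t : List Int) (X : PySem.Set Int) (p q : Int → Bool),
    (∀ x ∈ t, p x ≠ q x → x ∈ X) →
    PySem.Set.update X (t.filter p) = PySem.Set.update X (t.filter q)
  | [], _, _, _, _ => rfl
  | b :: t, X, p, q, h => by
    have hXb : b ∈ X → PySem.Set.add X b = X := fun hb => by
      rw [PySem.Set.add, if_pos (by simp [PySem.Set.contains, hb])]
    have ih : ∀ X', (∀ x ∈ t, p x ≠ q x → x ∈ X') →
        PySem.Set.update X' (t.filter p) = PySem.Set.update X' (t.filter q) :=
      fun X' h' => update_filter_congr t X' p q h'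
    by_cases hpq : p b = q b
    · have hq : q b = p b := hpq.symm
      cases hb : p b
      · rw [hb] at hq
        simp only [List.filter_cons, hb, hq, Bool.false_eq_true, if_false]
        exact ih X (fun x hx => h x (List.mem_cons_of_mem _ hx))
      · rw [hb] at hq
        simp only [List.filter_cons, hb, hq, if_true]
        show PySem.Set.update (PySem.Set.add X b) (t.filter p)
           = PySem.Set.update (PySem.Set.add X b) (t.filter q)
        exact ih _ (fun x hx hne => by
          rw [PySem.Set.mem_add]; left; exact h x (List.mem_cons_of_mem _ hx) hne)
    · have hbX : b ∈ X := h b (List.mem_cons_self) hpq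
      have key : ∀ (r : Int → Bool), PySem.Set.update X ((b :: t).filter r) = PySem.Set.update X (t.filter r) := by
        intro r
        cases hr : r b
        · simp [hr]
        · simp only [List.filter_cons, hr, if_true]
          show PySem.Set.update (PySem.Set.add X b) (t.filter r) = _
          rw [hXb hbX]
      rw [key p, key q]
      exact ih X (fun x hx => h x (List.mem_cons_of_mem _ hx))

-- B's inner loop over one simplex, key-list component.
theorem inner_keys (i : Int) :
    ∀ (s : List Int) (d : PySem.Dict Int (List Int)) (seen : PySem.Set Int),
    ((s.foldl (fun (st : PySem.Dict Int (List Int) × PySem.Set Int) x =>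
        if PySem.Set.contains st.2 x then st
        else (st.1.modify x [] (· ++ [i]), PySem.Set.add st.2 x)) (d, seen)).1).keys
      = PySem.Set.update d.keys (s.filter (fun x => !PySem.Set.contains seen x))
  | [], _, _ => rfl
  | a :: t, d, seen => by
    simp only [List.foldl_cons, List.filter_cons]
    by_cases ha : PySem.Set.contains seen a
    · rw [if_pos ha, inner_keys i t d seen, if_neg (by simp; simpa [PySem.Set.contains] using ha)]
    · rw [if_neg (by simpa using ha), inner_keys i t _ _]
      rw [if_pos (by simp; simpa [PySem.Set.contains] using ha)]
      show _ = PySem.Set.update (PySem.Set.add d.keys a) (t.filter (fun x => !PySem.Set.contains seen x))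
      rw [keys_modify_add]
      have hmem : a ∈ PySem.Set.add d.keys a := by rw [PySem.Set.mem_add]; right; rfl
      apply update_filter_congr
      intro x hx hne
      have hxa : x = a := by
        by_contra hxa
        apply hne
        simp [PySem.Set.contains, PySem.Set.mem_add, hxa]
      rw [hxa]; exact hmem

-- B's outer loop, dict-value view: y's bucket collects the first components of the pairs whose simplex contains y.
theorem outer_getD :
    ∀ (ps : List (Int × List Int)) (d : PySem.Dict Int (List Int)) (y : Int),
    (ps.foldl (fun idx p =>
      (p.2.foldl (fun (st : PySem.Dict Int (List Int) × PySem.Set Int) x =>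
          if PySem.Set.contains st.2 x then st
          else (st.1.modify x [] (· ++ [p.1]), PySem.Set.add st.2 x))
        (idx, PySem.Set.empty)).1) d).getD y []
      = d.getD y [] ++ (ps.filter (fun p => p.2.contains y)).map (·.1)
  | [], d, y => by simp
  | p :: ps, d, y => by
    simp only [List.foldl_cons, List.filter_cons]
    rw [outer_getD ps _ y, inner_getD p.1 p.2 d PySem.Set.empty y]
    by_cases hy : y ∈ p.2
    · rw [if_pos ⟨hy, by simp [PySem.Set.empty]⟩, if_pos (by simpa using hy)]
      simp
    · rw [if_neg (by simp [hy]), if_neg (by simpa using hy)]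

-- B's outer loop, key-list view: the same set-union fold as A's _union.
theorem outer_keys :
    ∀ (ps : List (Int × List Int)) (d : PySem.Dict Int (List Int)),
    (ps.foldl (fun idx p =>
      (p.2.foldl (fun (st : PySem.Dict Int (List Int) × PySem.Set Int) x =>
          if PySem.Set.contains st.2 x then st
          else (st.1.modify x [] (· ++ [p.1]), PySem.Set.add st.2 x))
        (idx, PySem.Set.empty)).1) d).keys
      = (ps.map (·.2)).foldl (fun u s => PySem.Set.update u s) d.keys
  | [], _ => rfl
  | p :: ps, d => by
    simp only [List.foldl_cons, List.map_cons]
    rw [outer_keys ps _, inner_keys p.1 p.2 d PySem.Set.empty]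
    congr 1
    have : ∀ x : Int, (!PySem.Set.contains PySem.Set.empty x) = true := by
      intro x; simp [PySem.Set.contains, PySem.Set.empty]
    rw [List.filter_eq_self.mpr (fun x _ => this x)]

theorem pyUnion_eq (S : List (List Int)) :
    pyUnion S = S.foldl (fun u s => PySem.Set.update u s) [] := rfl

theorem nodup_foldl_update :
    ∀ (S : List (List Int)) (u : PySem.Set Int), u.Nodup →
    (S.foldl (fun u s => PySem.Set.update u s) u).Nodup
  | [], _, h => h
  | s :: S, u, h => nodup_foldl_update S _ (PySem.Set.nodup_update u s h)

-- ===== VERDICT (by name: the statement is the Claim_ definition above) =====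
theorem to_cover_spec : Claim_equal_to_cover := by
  intro S _
  unfold Spec_to_cover
  simp only [to_cover, to_cover_alt]
  have hkeys :
      ((PySem.List.enumerate S 0).foldl (fun idx p =>
        (p.2.foldl (fun (st : PySem.Dict Int (List Int) × PySem.Set Int) x =>
            if PySem.Set.contains st.2 x then st
            else (st.1.modify x [] (· ++ [p.1]), PySem.Set.add st.2 x))
          (idx, PySem.Set.empty)).1) PySem.Dict.empty).keys = pyUnion S := by
    rw [outer_keys, PySem.List.map_snd_enumerate, PySem.Dict.keys_empty, pyUnion_eq]
  rw [Prod.mk.injEq]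
  refine ⟨?_, hkeys.symm⟩
  -- first components: A's Tc equals the values of B's dict
  rw [PySem.Dict.values_eq_map_keys _ (by rw [hkeys, pyUnion_eq]; exact nodup_foldl_update S [] List.nodup_nil) []]
  rw [hkeys]
  rw [PySem.List.foldl_append_singleton_eq_map]
  simp only [List.nil_append]
  apply List.map_congr_left
  intro x _
  rw [outer_getD, PySem.Dict.getD_empty, List.nil_append,
    PySem.List.foldl_append_if_eq_filter (fun i => (PySem.List.pyGetD S i []).contains x)]
  rw [PySem.List.enumerate_eq_map_pyRange (xs := S) (d := []), List.filter_map, List.map_map]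
  rw [show ((fun (x : Int × List Int) => x.1) ∘ fun j => ((j : Int), PySem.List.pyGetD S j ([] : List Int))) = fun j => j from rfl,
    show ((fun (p : Int × List Int) => p.2.contains x) ∘ fun j => ((j : Int), PySem.List.pyGetD S j ([] : List Int)))
       = fun j => (PySem.List.pyGetD S j []).contains x from rfl,
    List.map_id', List.nil_append]
  rfl
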